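-- pv_equiv track=rewrite | github.com/cmottao/WhatIsThis | problemas/relaciones_binarias.py | funcion_sobreyectiva
-- ===== SOURCE A (Python) =====
-- def relacion_funcion(a):
--     n = len(a)
--     m = len(a[0])
--     s = True
--     for i in range(n):
--         s2 = 0
--         for j in range(m):
--             s2 += a[i][j]
--         s = s and (s2 <= 1)
--     return s
--
-- def funcion_sobreyectiva(a):
--     n = len(a)
--     m = len(a[0])
--     s = True
--     for j in range(m):
--         s2 = False
--         for i in range(n):
--             s2 = s2 or (a[i][j] == 1)
--         s = s and s2
--     return s and relacion_funcion(a)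
-- ===== SOURCE B (Python) =====
-- def funcion_sobreyectiva(a):
--     m = len(a[0])
--     covered = set()
--     ok_rows = True
--     for row in a:
--         s = 0
--         for j in range(m):
--             v = row[j]
--             s += v
--             if v == 1:
--                 covered.add(j)
--         if s > 1:
--             ok_rows = False
--     return len(covered) == m and ok_rows
-- ===== Notes on version B (the rewrite author's own statement) =====
-- stated objective: alternative
-- what changed: Replaces A's two orientation-flipped double loops (a column-major any-pass plus a separate row-major sum-pass) with a single row-major pass maintaining a covered-column set and a rows-ok flag.
-- outside the precondition, e.g. on funcion_sobreyectiva([[1, 2, 1, 2, 1], [2, 2, 2, 0, 0], [1, 1, 1, 0]]): A returns False, B raises IndexError; on funcion_sobreyectiva([]): A raises IndexError, B raises IndexError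
import Mathlib
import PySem

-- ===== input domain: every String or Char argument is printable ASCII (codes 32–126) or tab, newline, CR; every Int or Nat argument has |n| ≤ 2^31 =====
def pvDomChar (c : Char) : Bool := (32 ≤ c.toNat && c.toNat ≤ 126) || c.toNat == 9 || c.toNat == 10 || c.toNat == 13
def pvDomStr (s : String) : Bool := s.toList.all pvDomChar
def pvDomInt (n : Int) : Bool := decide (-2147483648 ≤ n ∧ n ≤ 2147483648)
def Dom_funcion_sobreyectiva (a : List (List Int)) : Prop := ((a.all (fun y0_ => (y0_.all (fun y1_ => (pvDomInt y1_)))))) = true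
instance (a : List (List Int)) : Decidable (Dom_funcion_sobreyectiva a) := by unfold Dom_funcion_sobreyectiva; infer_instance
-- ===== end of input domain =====

-- B fuses A's two orientation-flipped double passes into one row-major pass keeping a covered-column
-- set and a rows-ok flag (objective: alternative — same O(n*m) cost, one pass instead of two).

-- ===== PORT A =====
def relacion_funcion (a : List (List Int)) : Bool :=
  let n : Int := a.length
  let m : Int := (PySem.List.pyGetD a 0 []).length
  (PySem.List.pyRange 0 n 1).foldl (fun s i =>
    let s2 : Int := (PySem.List.pyRange 0 m 1).foldl (fun s2 j =>
      s2 + PySem.List.pyGetD (PySem.List.pyGetD a i []) j 0) 0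
    s && decide (s2 ≤ 1)) true

def funcion_sobreyectiva (a : List (List Int)) : Bool :=
  let n : Int := a.length
  let m : Int := (PySem.List.pyGetD a 0 []).length
  let s := (PySem.List.pyRange 0 m 1).foldl (fun s j =>
    let s2 := (PySem.List.pyRange 0 n 1).foldl (fun s2 i =>
      s2 || decide (PySem.List.pyGetD (PySem.List.pyGetD a i []) j 0 = 1)) false
    s && s2) true
  s && relacion_funcion a

-- ===== PORT B =====
def funcion_sobreyectiva_alt (a : List (List Int)) : Bool :=
  let m : Int := (PySem.List.pyGetD a 0 []).length
  let st := a.foldl (fun (acc : PySem.Set Int × Bool) row =>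
    let inner := (PySem.List.pyRange 0 m 1).foldl (fun (p : Int × PySem.Set Int) j =>
      let v := PySem.List.pyGetD row j 0
      (p.1 + v, if v = 1 then PySem.Set.add p.2 j else p.2)) (0, acc.1)
    (inner.2, if 1 < inner.1 then false else acc.2)) (PySem.Set.empty, true)
  decide (PySem.Set.len st.1 = m) && st.2

-- ===== PRECONDITION & SPEC =====
-- Pre_ excludes the empty matrix (a[0] raises IndexError in both) and ragged matrices with a row
-- shorter than len(a[0]): there B's uniform pass raises IndexError while A raises too or, on some
-- inputs, returns a value only because `or`/`and` short-circuiting skips the out-of-range reads.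
def Pre_funcion_sobreyectiva (a : List (List Int)) : Prop :=
  a ≠ [] ∧ ∀ row ∈ a, (PySem.List.pyGetD a 0 []).length ≤ row.length
instance (a : List (List Int)) : Decidable (Pre_funcion_sobreyectiva a) := by
  unfold Pre_funcion_sobreyectiva; infer_instance
def pvWitness_funcion_sobreyectiva : List (List Int) := [[1, 0], [0, 1]]
def Spec_funcion_sobreyectiva (a : List (List Int)) (out : Bool) : Prop := out = funcion_sobreyectiva_alt a
instance (a : List (List Int)) (out : Bool) : Decidable (Spec_funcion_sobreyectiva a out) := by unfold Spec_funcion_sobreyectiva; infer_instance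

-- ===== CLAIM (what is proved, stated in full; the proofs are below) =====
def Claim_equal_funcion_sobreyectiva : Prop := ∀ (a : List (List Int)), Dom_funcion_sobreyectiva a → Pre_funcion_sobreyectiva a → Spec_funcion_sobreyectiva a (funcion_sobreyectiva a)

-- ===== LEMMAS AND PROOFS =====

theorem foldl_or_eq_any {β : Type} (l : List β) (f : β → Bool) (b : Bool) :
    l.foldl (fun s x => s || f x) b = (b || l.any f) := by
  induction l generalizing b with
  | nil => simp
  | cons x xs ih => simp [List.foldl_cons, ih, Bool.or_assoc]

theorem foldl_and_eq_all {β : Type} (l : List β) (f : β → Bool) (b : Bool) :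
    l.foldl (fun s x => s && f x) b = (b && l.all f) := by
  induction l generalizing b with
  | nil => simp
  | cons x xs ih => simp [List.foldl_cons, ih, Bool.and_assoc]

theorem foldl_if_false {β : Type} (l : List β) (P : β → Prop) [DecidablePred P] (b : Bool) :
    l.foldl (fun b x => if P x then false else b) b = (b && l.all (fun x => !decide (P x))) := by
  induction l generalizing b with
  | nil => simp
  | cons x xs ih =>
    simp only [List.foldl_cons, ih, List.all_cons]
    by_cases h : P x <;> simp [h]

theorem mem_foldl_add_if (l : List Int) (P : Int → Prop) [DecidablePred P]
    (s : PySem.Set Int) (x : Int) :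
    x ∈ l.foldl (fun s j => if P j then PySem.Set.add s j else s) s ↔
      x ∈ s ∨ ∃ j ∈ l, P j ∧ x = j := by
  induction l generalizing s with
  | nil => simp
  | cons y ys ih =>
    simp only [List.foldl_cons, List.mem_cons]
    by_cases h : P y <;>
      simp only [if_pos, h, ite_false, ih, PySem.Set.mem_add] <;>
      aesop

theorem nodup_foldl_add_if (l : List Int) (P : Int → Prop) [DecidablePred P]
    (s : PySem.Set Int) (hs : s.Nodup) :
    (l.foldl (fun s j => if P j then PySem.Set.add s j else s) s).Nodup := by
  induction l generalizing s with
  | nil => exact hs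
  | cons y ys ih =>
    by_cases h : P y <;> simp [h]
    · exact ih _ (PySem.Set.nodup_add _ _ hs)
    · exact ih _ hs

theorem mem_nested (rows : List (List Int)) (ℓ : List Int) (s : PySem.Set Int) (x : Int) :
    x ∈ rows.foldl (fun s row =>
        ℓ.foldl (fun s j => if PySem.List.pyGetD row j 0 = 1 then PySem.Set.add s j else s) s) s ↔
      x ∈ s ∨ ∃ row ∈ rows, ∃ j ∈ ℓ, PySem.List.pyGetD row j 0 = 1 ∧ x = j := by
  induction rows generalizing s with
  | nil => simp
  | cons r rs ih =>
    simp only [List.foldl_cons, ih, mem_foldl_add_if, List.mem_cons]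
    aesop

theorem nodup_nested (rows : List (List Int)) (ℓ : List Int) (s : PySem.Set Int) (hs : s.Nodup) :
    (rows.foldl (fun s row =>
        ℓ.foldl (fun s j => if PySem.List.pyGetD row j 0 = 1 then PySem.Set.add s j else s) s) s).Nodup := by
  induction rows generalizing s with
  | nil => exact hs
  | cons r rs ih => exact ih _ (nodup_foldl_add_if _ _ _ hs)

theorem nodup_sub_range_len (C : List Int) (m : Nat) (hC : C.Nodup)
    (hsub : ∀ x ∈ C, ∃ j < m, x = (j : Int)) :
    ((C.length : Int) = (m : Int)) ↔ ∀ j < m, (j : Int) ∈ C := by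
  set L := List.map (fun k : Nat => (k : Int)) (List.range m) with hLdef
  have hmemL : ∀ x : Int, x ∈ L ↔ ∃ j < m, x = (j : Int) := by
    intro x; simp [hLdef, List.mem_map, eq_comm]
  have hL : C ⊆ L := fun x hx => (hmemL x).mpr (hsub x hx)
  have hLnd : L.Nodup := List.Nodup.map (fun a b hab => by simpa using hab) List.nodup_range
  have hLlen : L.length = m := by simp [hLdef]
  constructor
  · intro hlen j hj
    have hsubF : C.toFinset ⊆ L.toFinset := by
      intro x hx; simp only [List.mem_toFinset] at *; exact hL hx
    have hcard : L.toFinset.card ≤ C.toFinset.card := by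
      rw [List.toFinset_card_of_nodup hC, List.toFinset_card_of_nodup hLnd, hLlen]; omega
    have heq := Finset.eq_of_subset_of_card_le hsubF hcard
    have : (j : Int) ∈ C.toFinset := by
      rw [heq]; simp only [List.mem_toFinset]; exact (hmemL _).mpr ⟨j, hj, rfl⟩
    simpa [List.mem_toFinset] using this
  · intro hall
    have hL2 : L ⊆ C := by
      intro x hx
      obtain ⟨j, hj, rfl⟩ := (hmemL x).mp hx
      exact hall j hj
    have h1 := (hC.subperm hL).length_le
    have h2 := (hLnd.subperm hL2).length_le
    omega

theorem funcion_sobreyectiva_eq_alt (a : List (List Int)) :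
    funcion_sobreyectiva a = funcion_sobreyectiva_alt a := by
  unfold funcion_sobreyectiva funcion_sobreyectiva_alt relacion_funcion
  simp only [PySem.List.pyRange_zero_natCast]
  have hB : (fun (acc : PySem.Set Int × Bool) (row : List Int) =>
      ((List.foldl (fun (p : Int × PySem.Set Int) j =>
          (p.1 + PySem.List.pyGetD row j 0,
            if PySem.List.pyGetD row j 0 = 1 then p.2.add j else p.2)) (0, acc.1)
          (List.map (fun k : Nat => (k : Int)) (List.range (PySem.List.pyGetD a 0 []).length))).2,
        if 1 < (List.foldl (fun (p : Int × PySem.Set Int) j =>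
          (p.1 + PySem.List.pyGetD row j 0,
            if PySem.List.pyGetD row j 0 = 1 then p.2.add j else p.2)) (0, acc.1)
          (List.map (fun k : Nat => (k : Int)) (List.range (PySem.List.pyGetD a 0 []).length))).1 then false
        else acc.2)) =
      fun acc row =>
      (List.foldl (fun s j => if PySem.List.pyGetD row j 0 = 1 then PySem.Set.add s j else s) acc.1
        (List.map (fun k : Nat => (k : Int)) (List.range (PySem.List.pyGetD a 0 []).length)),
        if 1 < 0 + ((List.map (fun k : Nat => (k : Int)) (List.range (PySem.List.pyGetD a 0 []).length)).map
            (fun j => PySem.List.pyGetD row j 0)).sum then false else acc.2) := by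
    funext acc row
    rw [PySem.List.foldl_prod_mk (fun (x : Int) j => x + PySem.List.pyGetD row j 0)
        (fun (s : PySem.Set Int) j => if PySem.List.pyGetD row j 0 = 1 then PySem.Set.add s j else s),
        PySem.List.foldl_add]
  rw [hB]
  rw [PySem.List.foldl_prod_mk
      (fun (s : PySem.Set Int) (row : List Int) =>
        List.foldl (fun s j => if PySem.List.pyGetD row j 0 = 1 then PySem.Set.add s j else s) s
          (List.map (fun k : Nat => (k : Int)) (List.range (PySem.List.pyGetD a 0 []).length)))
      (fun (b : Bool) (row : List Int) =>
        if 1 < 0 + ((List.map (fun k : Nat => (k : Int)) (List.range (PySem.List.pyGetD a 0 []).length)).map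
            (fun j => PySem.List.pyGetD row j 0)).sum then false else b)]
  simp only [PySem.List.foldl_add, foldl_if_false, foldl_or_eq_any, foldl_and_eq_all,
    Bool.true_and, Bool.false_or]
  set LM := List.map (fun k : Nat => (k : Int)) (List.range (PySem.List.pyGetD a 0 []).length) with hLM
  congr 1
  · -- coverage conjunct
    rw [Bool.eq_iff_iff]
    set C := List.foldl
        (fun s row => List.foldl (fun s j => if PySem.List.pyGetD row j 0 = 1 then PySem.Set.add s j else s) s LM)
        PySem.Set.empty a with hCdef
    have hmem : ∀ x : Int, x ∈ C ↔ ∃ row ∈ a, ∃ j ∈ LM, PySem.List.pyGetD row j 0 = 1 ∧ x = j := by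
      intro x
      rw [hCdef, mem_nested]
      simp [PySem.Set.empty]
    have hC : C.Nodup := nodup_nested _ _ _ (by simp [PySem.Set.empty])
    have hsub : ∀ x ∈ C, ∃ j < (PySem.List.pyGetD a 0 []).length, x = (j : Int) := by
      intro x hx
      obtain ⟨row, _, j, hj, _, rfl⟩ := (hmem x).mp hx
      rw [hLM] at hj
      simp only [List.mem_map, List.mem_range] at hj
      obtain ⟨k, hk, rfl⟩ := hj
      exact ⟨k, hk, rfl⟩
    have hlen := nodup_sub_range_len C (PySem.List.pyGetD a 0 []).length hC hsub
    simp only [PySem.Set.len, decide_eq_true_iff]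
    rw [hlen]
    simp only [List.all_eq_true, List.any_eq_true, List.mem_map, List.mem_range,
      decide_eq_true_iff]
    constructor
    · intro h j hj
      rw [hmem]
      obtain ⟨i, ⟨k, hk, rfl⟩, hval⟩ := h (↑j) (by rw [hLM]; simp only [List.mem_map, List.mem_range]; exact ⟨j, hj, rfl⟩)
      rw [PySem.List.pyGetD_natCast a k [], List.getD_eq_getElem _ _ hk] at hval
      refine ⟨a[k], List.getElem_mem hk, ↑j, ?_, hval, rfl⟩
      rw [hLM]; simp only [List.mem_map, List.mem_range]; exact ⟨j, hj, rfl⟩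
    · intro h x hx
      rw [hLM] at hx
      simp only [List.mem_map, List.mem_range] at hx
      obtain ⟨j, hj, rfl⟩ := hx
      have hmm := h j hj
      rw [hmem] at hmm
      obtain ⟨row, hrow, jj, hjj, hval, rfl⟩ := hmm
      obtain ⟨k, hk, rfl⟩ := List.mem_iff_getElem.mp hrow
      refine ⟨↑k, ⟨k, hk, rfl⟩, ?_⟩
      rw [PySem.List.pyGetD_natCast a k [], List.getD_eq_getElem _ _ hk]
      exact hval
  · -- row-sum conjunct
    rw [Bool.eq_iff_iff]
    simp only [List.all_eq_true, List.mem_map, List.mem_range, decide_eq_true_iff,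
      Bool.not_eq_true', decide_eq_false_iff_not]
    constructor
    · intro h row hrow
      obtain ⟨k, hk, rfl⟩ := List.mem_iff_getElem.mp hrow
      have := h _ ⟨k, hk, rfl⟩
      rw [PySem.List.pyGetD_natCast, List.getD_eq_getElem _ _ hk] at this
      omega
    · intro h x hx
      obtain ⟨k, hk, rfl⟩ := hx
      rw [PySem.List.pyGetD_natCast, List.getD_eq_getElem _ _ hk]
      have := h _ (List.getElem_mem hk)
      omega

-- ===== VERDICT (by name: the statement is the Claim_ definition above) =====
theorem funcion_sobreyectiva_spec : Claim_equal_funcion_sobreyectiva := by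
  intro a _hdom _hpre
  exact funcion_sobreyectiva_eq_alt a
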